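-- pv_equiv track=rewrite | github.com/dgilbs/dsp | python/q6_strings.py | fix_start
-- ===== SOURCE A (Python) =====
-- def fix_start(s):
--     """
--     Given a string s, return a string where all occurences of its
--     first char have been changed to '*', except do not change the
--     first char itself. e.g. 'babble' yields 'ba**le' Assume that the
--     string is length 1 or more.
--
--     >>> fix_start('babble')
--     'ba**le'
--     >>> fix_start('aardvark')
--     'a*rdv*rk'
--     >>> fix_start('google')
--     'goo*le'
--     >>> fix_start('donut')
--     'donut'
--     """
--     counter = 0
--     first_letter = s[0]
--     final_string = ""
--     while counter < len(s):
--         if counter != 0 and s[counter] == first_letter: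
--             final_string += "*"
--         else:
--             final_string += s[counter]
--         counter += 1
--     return final_string
-- ===== SOURCE B (Python) =====
-- def fix_start(s):
--     return s[0] + s[1:].replace(s[0], '*')
-- ===== Notes on version B (the rewrite author's own statement) =====
-- stated objective: simpler
-- what changed: Replaces the index-counting while loop with per-character branching and quadratic string += by slicing off the head and doing one bulk str.replace on the tail.
import Mathlib
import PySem

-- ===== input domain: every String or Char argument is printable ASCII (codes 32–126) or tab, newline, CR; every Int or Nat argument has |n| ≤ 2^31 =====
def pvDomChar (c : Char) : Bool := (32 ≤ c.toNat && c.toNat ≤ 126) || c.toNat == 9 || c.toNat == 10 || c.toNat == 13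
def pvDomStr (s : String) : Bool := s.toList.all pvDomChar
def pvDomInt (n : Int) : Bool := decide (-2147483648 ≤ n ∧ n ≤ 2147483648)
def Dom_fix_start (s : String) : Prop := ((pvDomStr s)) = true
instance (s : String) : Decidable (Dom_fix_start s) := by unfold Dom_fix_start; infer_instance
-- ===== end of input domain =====

-- B replaces A's index-counting while loop (per-character branch, string +=) by head + bulk replace on the tail; equivalence of the RETURN value is proved for all non-empty strings.

-- ===== PORT A =====
-- the while loop: counter, growing string accumulator
def fixA_go (s : List Char) (first_letter : Char) (counter : Nat) (final_string : List Char) : List Char :=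
  if _h : counter < s.length then
    fixA_go s first_letter (counter + 1)
      (final_string ++ [if counter != 0 && PySem.List.pyGetD s (counter : Int) ' ' == first_letter
                        then '*' else PySem.List.pyGetD s (counter : Int) ' '])
  else final_string
termination_by s.length - counter

def fix_start (s : String) : String :=
  let cs := s.toList
  -- s[0]: IndexError on the empty string, excluded by Pre_fix_start
  let first_letter := PySem.List.pyGetD cs 0 ' '
  String.mk (fixA_go cs first_letter 0 [])

-- ===== PORT B =====
def fix_start_alt (s : String) : String :=
  let cs := s.toList
  -- s[0]: IndexError on the empty string, excluded by Pre_fix_start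
  let c := PySem.List.pyGetD cs 0 ' '
  String.mk ([c] ++ PySem.Chars.replace (PySem.List.slice cs (some 1) none) [c] ['*'])

-- ===== PRECONDITION & SPEC =====
-- Pre_ excludes exactly the empty string, where Python's s[0] raises IndexError in both A and B.
def Pre_fix_start (s : String) : Prop := s ≠ ""
instance (s : String) : Decidable (Pre_fix_start s) := by unfold Pre_fix_start; infer_instance
def pvWitness_fix_start : String := "babble"

def Spec_fix_start (s : String) (out : String) : Prop := out = fix_start_alt s
instance (s : String) (out : String) : Decidable (Spec_fix_start s out) := by unfold Spec_fix_start; infer_instance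

-- ===== CLAIM (what is proved, stated in full; the proofs are below) =====
def Claim_equal_fix_start : Prop := ∀ (s : String), Dom_fix_start s → Pre_fix_start s → Spec_fix_start s (fix_start s)

-- ===== LEMMAS AND PROOFS =====

-- str.replace with a single-char pattern is a character map
theorem replace_go_single (fc : Char) : ∀ (fuel : Nat) (l acc : List Char), l.length ≤ fuel →
    PySem.Chars.replace.go [fc] ['*'] fuel l acc
      = acc.reverse ++ l.map (fun x => if x == fc then '*' else x) := by
  intro fuel
  induction fuel with
  | zero =>
    intro l acc h
    have : l = [] := List.eq_nil_of_length_eq_zero (Nat.le_zero.mp h)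
    subst this
    simp [PySem.Chars.replace.go]
  | succ n ih =>
    intro l acc h
    cases l with
    | nil => simp [PySem.Chars.replace.go]
    | cons c t =>
      rw [PySem.Chars.replace.go]
      by_cases hc : c = fc
      · subst hc
        have hp : List.isPrefixOf [c] (c :: t) = true := by simp [List.isPrefixOf]
        simp only [hp, if_pos]
        rw [show List.drop [c].length (c :: t) = t by simp]
        rw [ih t _ (by simpa using Nat.lt_succ_iff.mp (by simpa using h))]
        simp
      · have hp : List.isPrefixOf [fc] (c :: t) = false := by
          simp [List.isPrefixOf]
          exact fun hh => hc hh.symm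
        simp only [hp]
        rw [ih t _ (by simpa using Nat.lt_succ_iff.mp (by simpa using h))]
        simp [hc]

theorem replace_single (fc : Char) (l : List Char) :
    PySem.Chars.replace l [fc] ['*'] = l.map (fun x => if x == fc then '*' else x) := by
  rw [PySem.Chars.replace]
  simp only [List.isEmpty_cons, Bool.false_eq_true, if_false]
  simpa using replace_go_single fc l.length l [] (le_refl _)

-- A's loop from any counter ≥ 1 is a map over the remaining suffix
theorem fixA_go_tail (cs : List Char) (fc : Char) :
    ∀ (n counter : Nat) (acc : List Char), cs.length - counter ≤ n → 1 ≤ counter →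
    fixA_go cs fc counter acc
      = acc ++ (cs.drop counter).map (fun x => if x == fc then '*' else x) := by
  intro n
  induction n with
  | zero =>
    intro counter acc hle h1
    have hge : ¬ counter < cs.length := by omega
    rw [fixA_go, dif_neg hge, List.drop_eq_nil_of_le (by omega : cs.length ≤ counter)]
    simp
  | succ n ih =>
    intro counter acc hle h1
    rw [fixA_go]
    by_cases h : counter < cs.length
    · simp only [h, dif_pos]
      rw [ih (counter + 1) _ (by omega) (by omega)]
      have hg : PySem.List.pyGetD cs (counter : Int) ' ' = cs[counter] := by
        rw [PySem.List.pyGetD_natCast]; exact List.getD_eq_getElem _ _ h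
      rw [hg, List.drop_eq_getElem_cons h]
      have hne : (counter != 0) = true := by simp; omega
      simp [hne, List.append_assoc]
      rw [List.drop_eq_getElem_cons (show counter < (List.map (fun x => if x = fc then '*' else x) cs).length by simpa using h)]
      simp
    · rw [dif_neg h, List.drop_eq_nil_of_le (by omega : cs.length ≤ counter)]
      simp

-- ===== VERDICT (by name: the statement is the Claim_ definition above) =====
theorem fix_start_spec : Claim_equal_fix_start := by
  intro s _hdom hpre
  unfold Spec_fix_start fix_start fix_start_alt
  cases hcs : s.toList with
  | nil =>
    exact absurd (String.toList_eq_nil_iff.mp hcs) hpre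
  | cons c t =>
    simp only [PySem.List.pyGetD_zero_cons, PySem.List.slice_from_one, List.tail_cons,
      replace_single]
    rw [fixA_go]
    simp only [List.length_cons, Nat.zero_lt_succ, dif_pos]
    rw [fixA_go_tail (c :: t) c ((c :: t).length - 1) 1 _ (by omega) (by omega)]
    simp [PySem.List.pyGetD_zero_cons]
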